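-- pv_equiv track=rewrite | github.com/DEVZOOO/study | python/cosPro1/6th/Q07_upAndDown.py | solution
-- ===== SOURCE A (Python) =====
-- def solution(K, numbers, up_down):
-- 	'''
-- 	K
-- 	numbers {number[]} 참가자가 말한 숫자 배열
-- 	up_down {string[]} 참가자의 대답에 대한 up/down 여부
-- 	'''
-- 	left = 1
-- 	right = K	# max 자연수
-- 	for num, word in zip(numbers, up_down):
-- 		if word == "UP":
-- 			left = max(left, num + 1)
-- 		elif word == "DOWN":
-- 			right = min(right, num - 1)
-- 		elif word == "RIGHT":
-- 			return 1
-- 	return right - left + 1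
-- ===== SOURCE B (Python) =====
-- def solution(K, numbers, up_down):
--     def solve(pairs):
--         # None means a RIGHT clue was seen; else an interval (lo, hi) of values
--         # consistent with these clues.  Halves are combined by interval intersection,
--         # which is correct because max/min are associative and commutative.
--         if not pairs:
--             return (1, K)
--         if len(pairs) == 1:
--             num, w = pairs[0]
--             if w == "RIGHT":
--                 return None
--             if w == "UP":
--                 return (num + 1, K)
--             if w == "DOWN":
--                 return (1, num - 1)
--             return (1, K)
--         mid = len(pairs) // 2
--         a = solve(pairs[:mid])
--         b = solve(pairs[mid:])
--         if a is None or b is None: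
--             return None
--         return (max(a[0], b[0]), min(a[1], b[1]))
--
--     r = solve(list(zip(numbers, up_down)))
--     if r is None:
--         return 1
--     lo, hi = r
--     # intersect with the full candidate range [1, K]
--     return min(K, hi) - max(1, lo) + 1
-- ===== Notes on version B (the rewrite author's own statement) =====
-- stated objective: alternative
-- what changed: Replaces A's linear accumulator loop with early return by a divide-and-conquer recursion that maps each clue to an Option interval and intersects the intervals of the two halves.
import Mathlib
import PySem

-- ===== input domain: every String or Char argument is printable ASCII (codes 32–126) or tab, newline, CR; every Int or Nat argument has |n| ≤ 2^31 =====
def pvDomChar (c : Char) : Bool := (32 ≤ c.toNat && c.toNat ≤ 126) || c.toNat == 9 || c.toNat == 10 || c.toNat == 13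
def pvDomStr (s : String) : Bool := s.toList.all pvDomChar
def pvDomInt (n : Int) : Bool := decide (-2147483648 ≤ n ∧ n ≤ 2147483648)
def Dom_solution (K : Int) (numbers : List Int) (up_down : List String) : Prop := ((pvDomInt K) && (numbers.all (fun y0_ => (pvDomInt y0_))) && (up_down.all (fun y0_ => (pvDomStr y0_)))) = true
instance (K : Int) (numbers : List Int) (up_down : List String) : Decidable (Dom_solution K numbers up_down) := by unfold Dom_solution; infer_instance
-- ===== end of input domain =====

-- B replaces A's linear accumulator loop (with early return) by a divide-and-conquer
-- recursion intersecting Option intervals of the two halves; alternative structure, same result.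

-- ===== PORT A =====
-- the for-loop with early return, as structural recursion on the zipped list carrying (left, right)
def solutionLoop (left right : Int) : List (Int × String) → Int
  | [] => right - left + 1
  | (num, word) :: rest =>
    if word == "UP" then solutionLoop (max left (num + 1)) right rest
    else if word == "DOWN" then solutionLoop left (min right (num - 1)) rest
    else if word == "RIGHT" then 1
    else solutionLoop left right rest

def solution (K : Int) (numbers : List Int) (up_down : List String) : Int :=
  solutionLoop 1 K (numbers.zip up_down)

-- ===== PORT B =====
-- Source B's recursive `solve`: none = a RIGHT clue seen, else the interval (lo, hi)
def solveDC (K : Int) : List (Int × String) → Option (Int × Int)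
  | [] => some (1, K)
  | [(num, w)] =>
      if w == "RIGHT" then none
      else if w == "UP" then some (num + 1, K)
      else if w == "DOWN" then some (1, num - 1)
      else some (1, K)
  | p :: q :: rest =>
      let ps := p :: q :: rest
      let mid := ps.length / 2
      match solveDC K (ps.take mid), solveDC K (ps.drop mid) with
      | some a, some b => some (max a.1 b.1, min a.2 b.2)
      | _, _ => none
  termination_by ps => ps.length
  decreasing_by
    · simp [List.length_take]; omega
    · simp [List.length_drop]; omega

def solution_alt (K : Int) (numbers : List Int) (up_down : List String) : Int :=
  match solveDC K (numbers.zip up_down) with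
  | none => 1
  | some (lo, hi) => min K hi - max 1 lo + 1

-- ===== PRECONDITION & SPEC =====
def Spec_solution (K : Int) (numbers : List Int) (up_down : List String) (out : Int) : Prop := out = solution_alt K numbers up_down
instance (K : Int) (numbers : List Int) (up_down : List String) (out : Int) : Decidable (Spec_solution K numbers up_down out) := by unfold Spec_solution; infer_instance

-- ===== CLAIM (what is proved, stated in full; the proofs are below) =====
def Claim_equal_solution : Prop := ∀ (K : Int) (numbers : List Int) (up_down : List String), Dom_solution K numbers up_down → Spec_solution K numbers up_down (solution K numbers up_down)

-- ===== LEMMAS AND PROOFS =====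

-- spec-side bounds: the lower / upper bound accumulated over all the pairs, clamped to [1,K]
def pvLo (ps : List (Int × String)) : Int :=
  (ps.map (fun p => if p.2 == "UP" then p.1 + 1 else 1)).foldl max 1
def pvHi (K : Int) (ps : List (Int × String)) : Int :=
  (ps.map (fun p => if p.2 == "DOWN" then p.1 - 1 else K)).foldl min K

lemma le_foldl_max (xs : List Int) : ∀ i : Int, i ≤ xs.foldl max i := by
  induction xs with
  | nil => intro i; simp
  | cons x xs ih => intro i; exact le_trans (le_max_left i x) (ih _)

lemma foldl_min_le (xs : List Int) : ∀ i : Int, xs.foldl min i ≤ i := by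
  induction xs with
  | nil => intro i; simp
  | cons x xs ih => intro i; exact le_trans (ih _) (min_le_left i x)

lemma foldl_max_append (xs ys : List Int) (i : Int) :
    (xs ++ ys).foldl max i = max (xs.foldl max i) (ys.foldl max i) := by
  calc (xs ++ ys).foldl max i = ys.foldl max (xs.foldl max i) := List.foldl_append
    _ = ys.foldl max (max (xs.foldl max i) i) := by rw [max_eq_left (le_foldl_max xs i)]
    _ = max (xs.foldl max i) (ys.foldl max i) := List.foldl_assoc

lemma foldl_min_append (xs ys : List Int) (i : Int) :
    (xs ++ ys).foldl min i = min (xs.foldl min i) (ys.foldl min i) := by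
  calc (xs ++ ys).foldl min i = ys.foldl min (xs.foldl min i) := List.foldl_append
    _ = ys.foldl min (min (xs.foldl min i) i) := by rw [min_eq_left (foldl_min_le xs i)]
    _ = min (xs.foldl min i) (ys.foldl min i) := List.foldl_assoc

lemma pvLo_append (xs ys : List (Int × String)) :
    pvLo (xs ++ ys) = max (pvLo xs) (pvLo ys) := by
  simp only [pvLo, List.map_append]; exact foldl_max_append _ _ 1

lemma pvHi_append (K : Int) (xs ys : List (Int × String)) :
    pvHi K (xs ++ ys) = min (pvHi K xs) (pvHi K ys) := by
  simp only [pvHi, List.map_append]; exact foldl_min_append _ _ K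

-- characterisation of solveDC, up to the final clamp with [1, K]
lemma solveDC_eq (K : Int) (ps : List (Int × String)) :
    (solveDC K ps = none ↔ ps.any (fun p => p.2 == "RIGHT")) ∧
    (∀ lo hi, solveDC K ps = some (lo, hi) → max 1 lo = pvLo ps ∧ min K hi = pvHi K ps) := by
  fun_induction solveDC K ps with
  | case1 => simp [pvLo, pvHi]
  | case2 num w hR => simp [pvLo, pvHi, hR]
  | case3 num w hR hU =>
    have hU' : w = "UP" := by simpa using hU
    subst hU'
    simp [pvLo, pvHi]
  | case4 num w hR hU hD =>
    have hD' : w = "DOWN" := by simpa using hD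
    subst hD'
    simp [pvLo, pvHi]
  | case5 num w hR hU hD =>
    have hU' : w ≠ "UP" := by simpa using hU
    have hD' : w ≠ "DOWN" := by simpa using hD
    simp [pvLo, pvHi, hR, hU', hD']
  | case6 p q rest PS MID a b hdrop htake ihT ihD =>
    have hPS : PS = p :: q :: rest := rfl
    have hMID : MID = PS.length / 2 := rfl
    rw [← hPS]
    have hsplit : List.take MID PS ++ List.drop MID PS = PS := List.take_append_drop _ _
    constructor
    · simp only [Option.some_ne_none, false_iff]
      rw [← hsplit, List.any_append]
      have h1 : ((List.take MID PS).any fun p => p.2 == "RIGHT") = false := by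
        rw [← Bool.not_eq_true, ← ihT.1, htake]; simp
      have h2 : ((List.drop MID PS).any fun p => p.2 == "RIGHT") = false := by
        rw [← Bool.not_eq_true, ← ihD.1, hdrop]; simp
      simp only [h1, h2, Bool.or_false, Bool.false_eq_true, not_false_eq_true]
    · intro lo hi h
      obtain ⟨rfl, rfl⟩ : lo = max a.1 b.1 ∧ hi = min a.2 b.2 := by
        injection h with h'; exact ⟨(congrArg Prod.fst h').symm, (congrArg Prod.snd h').symm⟩
      obtain ⟨ha1, ha2⟩ := ihT.2 a.1 a.2 (by rw [htake])
      obtain ⟨hb1, hb2⟩ := ihD.2 b.1 b.2 (by rw [hdrop])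
      constructor
      · rw [← hsplit, pvLo_append, ← ha1, ← hb1, max_max_max_comm, max_self]
      · rw [← hsplit, pvHi_append, ← ha2, ← hb2, min_min_min_comm, min_self]
  | case7 p q rest PS MID hno ihT ihD =>
    have hPS : PS = p :: q :: rest := rfl
    rw [← hPS]
    have hsplit : List.take MID PS ++ List.drop MID PS = PS := List.take_append_drop _ _
    constructor
    · simp only [true_iff]
      rw [← hsplit, List.any_append]
      rcases htake : solveDC K (List.take MID PS) with _ | a
      · rw [ihT.1] at htake; simp [htake]
      · rcases hdrop : solveDC K (List.drop MID PS) with _ | b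
        · rw [ihD.1] at hdrop; simp [hdrop]
        · exact absurd (hno a b htake hdrop) not_false
    · intro lo hi h; cases h

-- A's loop, characterised as RIGHT-detection plus two folds over the filtered pairs
lemma solutionLoop_eq (ps : List (Int × String)) : ∀ (left right : Int),
    solutionLoop left right ps =
      if ps.any (fun p => p.2 == "RIGHT") then 1
      else (((ps.filter (fun p => p.2 == "DOWN")).map (fun p => p.1 - 1)).foldl min right)
           - (((ps.filter (fun p => p.2 == "UP")).map (fun p => p.1 + 1)).foldl max left) + 1 := by
  induction ps with
  | nil => intro left right; simp [solutionLoop]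
  | cons hd tl ih =>
    intro left right
    obtain ⟨num, word⟩ := hd
    by_cases hU : word = "UP"
    · subst hU; simp [solutionLoop, ih]; simp only [Bool.false_or]
    · by_cases hD : word = "DOWN"
      · subst hD; simp [solutionLoop, ih]; simp only [Bool.false_or]
      · by_cases hR : word = "RIGHT"
        · subst hR; simp [solutionLoop]
        · simp [solutionLoop, beq_iff_eq, hU, hD, hR, ih]; simp only [beq_eq_false_iff_ne.mpr hR, Bool.false_or]

-- A's filtered folds equal the clamped all-pairs folds pvLo / pvHi
lemma filter_fold_max (ps : List (Int × String)) : ∀ i : Int, 1 ≤ i →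
    ((ps.filter (fun p => p.2 == "UP")).map (fun p => p.1 + 1)).foldl max i =
      (ps.map (fun p => if p.2 == "UP" then p.1 + 1 else 1)).foldl max i := by
  induction ps with
  | nil => intro i _; rfl
  | cons hd tl ih =>
    intro i hi
    by_cases h : hd.2 = "UP"
    · simp only [List.filter_cons, h, if_pos, beq_self_eq_true, List.map_cons, List.foldl_cons, beq_iff_eq]
      simpa using ih _ (le_trans hi (le_max_left _ _))
    · simp only [List.filter_cons, beq_iff_eq, h, List.map_cons, List.foldl_cons, if_false, max_eq_left hi]
      simpa using ih _ hi

lemma filter_fold_min (K : Int) (ps : List (Int × String)) : ∀ i : Int, i ≤ K →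
    ((ps.filter (fun p => p.2 == "DOWN")).map (fun p => p.1 - 1)).foldl min i =
      (ps.map (fun p => if p.2 == "DOWN" then p.1 - 1 else K)).foldl min i := by
  induction ps with
  | nil => intro i _; rfl
  | cons hd tl ih =>
    intro i hi
    by_cases h : hd.2 = "DOWN"
    · simp only [List.filter_cons, h, if_pos, beq_self_eq_true, List.map_cons, List.foldl_cons, beq_iff_eq]
      simpa using ih _ (le_trans (min_le_left _ _) hi)
    · simp only [List.filter_cons, beq_iff_eq, h, List.map_cons, List.foldl_cons, if_false, min_eq_left hi]
      simpa using ih _ hi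

-- ===== VERDICT (by name: the statement is the Claim_ definition above) =====
theorem solution_spec : Claim_equal_solution := by
  intro K numbers up_down _
  unfold Spec_solution solution solution_alt
  set ps := numbers.zip up_down with hps
  rw [solutionLoop_eq ps 1 K]
  obtain ⟨hnone, hsome⟩ := solveDC_eq K ps
  rcases h : solveDC K ps with _ | ⟨lo, hi⟩
  · rw [h] at hnone; simp [hnone.mp rfl]
  · have hR : ¬ (ps.any fun p => p.2 == "RIGHT") := by
      intro hcontra; rw [← hnone] at hcontra; simp [h] at hcontra
    obtain ⟨h1, h2⟩ := hsome lo hi h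
    simp only [hR, Bool.false_eq_true, if_false]
    rw [filter_fold_max ps 1 le_rfl, filter_fold_min K ps K le_rfl]
    rw [← pvLo, ← pvHi, ← h1, ← h2]
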